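-- pv_equiv track=rewrite | github.com/eecspan/LLMCompass_3D_NMP | change/matmul_HBM.py | generate_hbm_batches
-- ===== SOURCE A (Python) =====
-- from typing import List, Tuple, Optional
--
-- def generate_hbm_batches(
--     M_tiles: int,
--     N_tiles: int,
--     K_tiles: int,
--     channel_count: int,
--     schedule: str,
--     custom_batches: Optional["List[List[Tuple[int,int,int]]]"] = None,
-- ) -> "List[List[Tuple[int,int,int]]]":
--     """生成分批执行的 HBM tile 列表。
--     返回值为批次列表；每个批次是 (m_idx, n_idx, k_idx) 元组的列表；
--     同一批次内的 tile 视为并行执行，批次时长取该批次内最长 tile 时长。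
--     预置策略：
--     - row-major: 先按 k，从小到大；k 固定时按 m 行、n 列扫描，将每批最多 channel_count 个 tile 打包。
--     - col-major: 与上类似，但 n 优先。
--     - diagonal: 对 (m, n) 网格按反对角线 (m+n = 常数) 切片，每片最多 channel_count 个。
--     - diagonal-channel: 针对 M_tiles == N_tiles 的“对角移位”调度；
--       第 b 批为 core c 分配 (m=c, n=(c+b)%N_tiles, k=0)。若 K_tiles>1，则对每个 k 顺序重复该模式。
--     - custom: 使用 custom_batches 直接指定批次。
--
--     - todo:这一块的函数要仔细检查
--     """
--     batches: List[List[Tuple[int,int,int]]] = []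
--
--     if schedule == "custom":
--         return custom_batches or []
--
--     def chunk(items: List[Tuple[int,int,int]], n: int) -> List[List[Tuple[int,int,int]]]:
--         return [items[i:i+n] for i in range(0, len(items), n)]
--
--     if schedule == "row-major":
--         for k in range(K_tiles):
--             flat: List[Tuple[int,int,int]] = []
--             for m in range(M_tiles):
--                 for n in range(N_tiles):
--                     flat.append((m, n, k))
--             batches.extend(chunk(flat, channel_count))
--         return batches
--
--     if schedule == "col-major":
--         for k in range(K_tiles):
--             flat: List[Tuple[int,int,int]] = []
--             for n in range(N_tiles):
--                 for m in range(M_tiles):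
--                     flat.append((m, n, k))
--             batches.extend(chunk(flat, channel_count))
--         return batches
--
--     if schedule == "diagonal":
--         for k in range(K_tiles):
--             # 反对角线：s = m + n，从 0 到 (M_tiles+N_tiles-2)
--             for s in range(M_tiles + N_tiles - 1):
--                 diag: List[Tuple[int,int,int]] = []
--                 m_start = max(0, s - (N_tiles - 1))
--                 m_end = min(M_tiles - 1, s)
--                 for m in range(m_start, m_end + 1):
--                     n = s - m
--                     diag.append((m, n, k))
--                 batches.extend(chunk(diag, channel_count))
--         return batches
--
--     if schedule == "diagonal-channel":
--         # 针对“对角运算”需求；要求 M_tiles 与 N_tiles 至少覆盖 channel_count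
--         # k 维度顺序执行；每个 k 上进行 B = max(M_tiles, N_tiles) 个批次
--         # C = min(M_tiles, N_tiles)
--         # if C == 0:
--         #     return []
--         # B = max(M_tiles, N_tiles)
--         for k in range(K_tiles):
--             for b in range(channel_count): # b 表示第 b 批，即相对于对角线的偏移量
--                 batch: List[Tuple[int,int,int]] = []
--                 # 为每个 core 分配一个 (m, n)
--                 for c in range(channel_count): # c 表示 core 的编号
--                     m = c % M_tiles
--                     n = (c + b) % N_tiles
--                     batch.append((m, n, k))
--                 if batch:
--                     batches.append(batch)
--         return batches
--
--     # 默认退化为 row-major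
--     for k in range(K_tiles):
--         flat: List[Tuple[int,int,int]] = []
--         for m in range(M_tiles):
--             for n in range(N_tiles):
--                 flat.append((m, n, k))
--         batches.extend(chunk(flat, channel_count))
--     return batches
-- ===== SOURCE B (Python) =====
-- def generate_hbm_batches(M_tiles, N_tiles, K_tiles, channel_count, schedule, custom_batches=None):
--     if schedule == "custom":
--         return custom_batches or []
--
--     if schedule == "diagonal-channel":
--         return [
--             [(c % M_tiles, (c + b) % N_tiles, k) for c in range(channel_count)]
--             for k in range(K_tiles)
--             for b in range(channel_count)
--         ]
--
--     batches = []
--     if schedule == "diagonal":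
--         for k in range(K_tiles):
--             for s in range(M_tiles + N_tiles - 1):
--                 m_start = max(0, s - (N_tiles - 1))
--                 cnt = max(0, min(M_tiles - 1, s) - m_start + 1)
--                 for i in range(0, cnt, channel_count):
--                     batches.append([
--                         (m_start + i + j, s - m_start - i - j, k)
--                         for j in range(min(channel_count, cnt - i))
--                     ])
--         return batches
--
--     # row-major, col-major and the default (row-major) schedule:
--     # decode linear tile indices arithmetically instead of building a flat list.
--     per_k = max(M_tiles, 0) * max(N_tiles, 0)
--     col = schedule == "col-major"
--     inner = M_tiles if col else N_tiles
--     for k in range(K_tiles):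
--         for start in range(0, per_k, channel_count):
--             stop = min(start + channel_count, per_k)
--             if col:
--                 batches.append([(i % inner, i // inner, k) for i in range(start, stop)])
--             else:
--                 batches.append([(i // inner, i % inner, k) for i in range(start, stop)])
--     return batches
-- ===== Notes on version B (the rewrite author's own statement) =====
-- stated objective: alternative
-- what changed: Instead of materialising a flat per-k tile list and slicing it into chunks, B emits each batch directly by iterating over batch start offsets and decoding linear tile indices arithmetically (row-major: (i//N, i%N); col-major: (i%M, i//M)); the diagonal schedule computes each anti-diagonal's batches from its start/count by index arithmetic, and diagonal-channel is a direct nested comprehension.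
import Mathlib
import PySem

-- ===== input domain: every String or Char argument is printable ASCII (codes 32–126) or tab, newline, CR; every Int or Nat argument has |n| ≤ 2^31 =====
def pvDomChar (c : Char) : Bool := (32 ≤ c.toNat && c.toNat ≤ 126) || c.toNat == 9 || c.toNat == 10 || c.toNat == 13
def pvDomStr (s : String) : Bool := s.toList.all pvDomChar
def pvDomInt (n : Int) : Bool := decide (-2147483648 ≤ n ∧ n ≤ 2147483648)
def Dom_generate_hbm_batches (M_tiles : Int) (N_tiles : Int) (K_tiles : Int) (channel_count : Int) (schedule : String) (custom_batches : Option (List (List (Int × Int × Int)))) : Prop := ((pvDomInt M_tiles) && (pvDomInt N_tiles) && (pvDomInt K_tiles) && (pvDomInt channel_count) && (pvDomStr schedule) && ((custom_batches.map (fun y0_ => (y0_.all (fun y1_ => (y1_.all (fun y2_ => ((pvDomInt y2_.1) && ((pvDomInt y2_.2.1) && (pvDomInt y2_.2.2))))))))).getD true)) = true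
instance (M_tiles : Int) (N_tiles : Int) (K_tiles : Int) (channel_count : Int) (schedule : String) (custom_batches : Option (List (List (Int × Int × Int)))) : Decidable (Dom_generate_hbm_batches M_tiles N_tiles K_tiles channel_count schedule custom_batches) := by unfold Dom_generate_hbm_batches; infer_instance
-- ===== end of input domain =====

-- B re-implements the flat-then-chunk schedules by decoding linear tile indices arithmetically
-- per batch (no intermediate flat list); objective: alternative decomposition, same cost class.

-- ===== PORT A =====
-- chunk(items, n) = [items[i:i+n] for i in range(0, len(items), n)]
def pvChunk (items : List (Int × Int × Int)) (n : Int) : List (List (Int × Int × Int)) :=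
  (PySem.List.pyRange 0 (items.length : Int) n).map
    (fun i => PySem.List.slice items (some i) (some (i + n)))

def generate_hbm_batches (M_tiles : Int) (N_tiles : Int) (K_tiles : Int) (channel_count : Int)
    (schedule : String) (custom_batches : Option (List (List (Int × Int × Int)))) :
    List (List (Int × Int × Int)) :=
  if schedule = "custom" then custom_batches.getD []
  else if schedule = "row-major" then
    (PySem.List.pyRange 0 K_tiles 1).foldl (fun batches k =>
      let flat := (PySem.List.pyRange 0 M_tiles 1).foldl (fun fl m =>
        (PySem.List.pyRange 0 N_tiles 1).foldl (fun fl n => fl ++ [(m, n, k)]) fl) []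
      batches ++ pvChunk flat channel_count) []
  else if schedule = "col-major" then
    (PySem.List.pyRange 0 K_tiles 1).foldl (fun batches k =>
      let flat := (PySem.List.pyRange 0 N_tiles 1).foldl (fun fl n =>
        (PySem.List.pyRange 0 M_tiles 1).foldl (fun fl m => fl ++ [(m, n, k)]) fl) []
      batches ++ pvChunk flat channel_count) []
  else if schedule = "diagonal" then
    (PySem.List.pyRange 0 K_tiles 1).foldl (fun batches k =>
      (PySem.List.pyRange 0 (M_tiles + N_tiles - 1) 1).foldl (fun batches s =>
        let m_start := max 0 (s - (N_tiles - 1))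
        let m_end := min (M_tiles - 1) s
        let diag := (PySem.List.pyRange m_start (m_end + 1) 1).foldl
          (fun d m => d ++ [(m, s - m, k)]) []
        batches ++ pvChunk diag channel_count) batches) []
  else if schedule = "diagonal-channel" then
    (PySem.List.pyRange 0 K_tiles 1).foldl (fun batches k =>
      (PySem.List.pyRange 0 channel_count 1).foldl (fun batches b =>
        let batch := (PySem.List.pyRange 0 channel_count 1).foldl
          (fun bt c => bt ++ [(PySem.Int.mod c M_tiles, PySem.Int.mod (c + b) N_tiles, k)]) []
        if batch.isEmpty then batches else batches ++ [batch]) batches) []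
  else
    (PySem.List.pyRange 0 K_tiles 1).foldl (fun batches k =>
      let flat := (PySem.List.pyRange 0 M_tiles 1).foldl (fun fl m =>
        (PySem.List.pyRange 0 N_tiles 1).foldl (fun fl n => fl ++ [(m, n, k)]) fl) []
      batches ++ pvChunk flat channel_count) []

-- ===== PORT B =====
def generate_hbm_batches_alt (M_tiles : Int) (N_tiles : Int) (K_tiles : Int) (channel_count : Int)
    (schedule : String) (custom_batches : Option (List (List (Int × Int × Int)))) :
    List (List (Int × Int × Int)) :=
  if schedule = "custom" then custom_batches.getD []
  else if schedule = "diagonal-channel" then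
    (PySem.List.pyRange 0 K_tiles 1).flatMap (fun k =>
      (PySem.List.pyRange 0 channel_count 1).map (fun b =>
        (PySem.List.pyRange 0 channel_count 1).map (fun c =>
          (PySem.Int.mod c M_tiles, PySem.Int.mod (c + b) N_tiles, k))))
  else if schedule = "diagonal" then
    (PySem.List.pyRange 0 K_tiles 1).foldl (fun batches k =>
      (PySem.List.pyRange 0 (M_tiles + N_tiles - 1) 1).foldl (fun batches s =>
        let m_start := max 0 (s - (N_tiles - 1))
        let cnt := max 0 (min (M_tiles - 1) s - m_start + 1)
        (PySem.List.pyRange 0 cnt channel_count).foldl (fun batches i =>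
          batches ++ [(PySem.List.pyRange 0 (min channel_count (cnt - i)) 1).map
            (fun j => (m_start + i + j, s - m_start - i - j, k))]) batches) batches) []
  else
    let per_k := max M_tiles 0 * max N_tiles 0
    let col := schedule = "col-major"
    let inner := if col then M_tiles else N_tiles
    (PySem.List.pyRange 0 K_tiles 1).foldl (fun batches k =>
      (PySem.List.pyRange 0 per_k channel_count).foldl (fun batches start =>
        let stop := min (start + channel_count) per_k
        if col then
          batches ++ [(PySem.List.pyRange start stop 1).map (fun i =>
            (PySem.Int.mod i inner, PySem.Int.floordiv i inner, k))]
        else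
          batches ++ [(PySem.List.pyRange start stop 1).map (fun i =>
            (PySem.Int.floordiv i inner, PySem.Int.mod i inner, k))]) batches) []

-- ===== PRECONDITION & SPEC =====
-- Pre_ excludes exactly the inputs where the Python A raises: ValueError from range(0, len, 0)
-- in chunk (channel_count = 0 while the k-loop — and for "diagonal" the s-loop — runs), and
-- ZeroDivisionError from `% 0` in "diagonal-channel" when a tile dimension is 0 and the loops run.
def Pre_generate_hbm_batches (M_tiles : Int) (N_tiles : Int) (K_tiles : Int) (channel_count : Int)
    (schedule : String) (_custom_batches : Option (List (List (Int × Int × Int)))) : Prop :=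
  if schedule = "custom" then True
  else if schedule = "diagonal-channel" then
    ¬ (1 ≤ K_tiles ∧ 1 ≤ channel_count ∧ (M_tiles = 0 ∨ N_tiles = 0))
  else if schedule = "diagonal" then
    ¬ (channel_count = 0 ∧ 1 ≤ K_tiles ∧ 2 ≤ M_tiles + N_tiles)
  else ¬ (channel_count = 0 ∧ 1 ≤ K_tiles)
instance (M_tiles : Int) (N_tiles : Int) (K_tiles : Int) (channel_count : Int) (schedule : String) (custom_batches : Option (List (List (Int × Int × Int)))) : Decidable (Pre_generate_hbm_batches M_tiles N_tiles K_tiles channel_count schedule custom_batches) := by unfold Pre_generate_hbm_batches; infer_instance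

def pvWitness_generate_hbm_batches : Int × Int × Int × Int × String × (Option (List (List (Int × Int × Int)))) :=
  (2, 3, 2, 2, "row-major", none)

def Spec_generate_hbm_batches (M_tiles : Int) (N_tiles : Int) (K_tiles : Int) (channel_count : Int) (schedule : String) (custom_batches : Option (List (List (Int × Int × Int)))) (out : List (List (Int × Int × Int))) : Prop := out = generate_hbm_batches_alt M_tiles N_tiles K_tiles channel_count schedule custom_batches
instance (M_tiles : Int) (N_tiles : Int) (K_tiles : Int) (channel_count : Int) (schedule : String) (custom_batches : Option (List (List (Int × Int × Int)))) (out : List (List (Int × Int × Int))) : Decidable (Spec_generate_hbm_batches M_tiles N_tiles K_tiles channel_count schedule custom_batches out) := by unfold Spec_generate_hbm_batches; infer_instance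

-- ===== CLAIM (what is proved, stated in full; the proofs are below) =====
def Claim_equal_generate_hbm_batches : Prop := ∀ (M_tiles : Int) (N_tiles : Int) (K_tiles : Int) (channel_count : Int) (schedule : String) (custom_batches : Option (List (List (Int × Int × Int)))), Dom_generate_hbm_batches M_tiles N_tiles K_tiles channel_count schedule custom_batches → Pre_generate_hbm_batches M_tiles N_tiles K_tiles channel_count schedule custom_batches → Spec_generate_hbm_batches M_tiles N_tiles K_tiles channel_count schedule custom_batches (generate_hbm_batches M_tiles N_tiles K_tiles channel_count schedule custom_batches)

-- ===== LEMMAS AND PROOFS =====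

-- canonical "map over an int range" form
def rgm (g : Int → Int × Int × Int) (a b : Int) : List (Int × Int × Int) :=
  (PySem.List.pyRange a b 1).map g

theorem rgm_eq_range (g : Int → Int × Int × Int) (a b : Int) :
    rgm g a b = (List.range (b - a).toNat).map (fun (t : Nat) => g (a + (t : Int))) := by
  rw [rgm, PySem.List.pyRange_one, List.map_map]
  rfl

theorem pvDropRangeMap {α : Type} (f : Nat → α) (L n : Nat) :
    (((List.range L).map f).drop n) = (List.range (L - n)).map (fun j => f (n + j)) := by
  rcases (by omega : n ≤ L ∨ L < n) with h | h
  · conv_lhs => rw [show L = n + (L - n) by omega, List.range_add, List.map_append]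
    rw [List.drop_append_of_le_length (by simp), List.map_map]
    simp [List.drop_eq_nil_of_le]
  · rw [List.drop_eq_nil_of_le (by simp; omega), show L - n = 0 by omega]
    simp

theorem pvSliceRgm (g : Int → Int × Int × Int) (P i cc : Int) (h0 : 0 ≤ i) (hcc : 0 ≤ cc) :
    PySem.List.slice (rgm g 0 P) (some i) (some (i + cc)) = rgm g i (min (i + cc) P) := by
  rw [PySem.List.slice_toNat (rgm g 0 P) (a := i) (b := i + cc) h0 (by omega)]
  rw [rgm_eq_range, rgm_eq_range, pvDropRangeMap, ← List.map_take, List.take_range]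
  rw [show min ((i + cc).toNat - i.toNat) ((P - 0).toNat - i.toNat)
        = (min (i + cc) P - i).toNat by omega]
  apply List.map_congr_left
  intro j _
  congr 1
  omega

theorem pvRangeNilOfNeg (a b s : Int) (hs : s < 0) (hab : a ≤ b) :
    PySem.List.pyRange a b s = [] := by
  simp only [PySem.List.pyRange]
  rw [if_neg (by omega), if_neg (by omega), if_neg (by omega)]
  simp

theorem pvChunkRgm (P cc : Int) (hP : 0 ≤ P) (hcc : cc ≠ 0) (g : Int → Int × Int × Int) :
    pvChunk (rgm g 0 P) cc
      = (PySem.List.pyRange 0 P cc).map (fun i => rgm g i (min (i + cc) P)) := by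
  have hlen : (((rgm g 0 P).length : Nat) : Int) = P := by
    simp [rgm, PySem.List.length_pyRange_one]; omega
  unfold pvChunk
  rw [hlen]
  rcases lt_or_gt_of_ne hcc with hneg | hpos
  · rw [pvRangeNilOfNeg 0 P cc hneg hP]; simp
  · apply List.map_congr_left
    intro x hx
    rw [PySem.List.mem_pyRange_iff_of_pos hpos] at hx
    exact pvSliceRgm g P x cc hx.1 (le_of_lt hpos)

theorem pvDecodeNat {α : Type} (Mn Nn : Nat) (g : Nat → Nat → α) :
    (List.range Mn).flatMap (fun m => (List.range Nn).map (fun n => g m n))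
      = (List.range (Mn * Nn)).map (fun i => g (i / Nn) (i % Nn)) := by
  induction Mn with
  | zero => simp
  | succ m ih =>
    rw [List.range_succ, List.flatMap_append, ih,
        show (m + 1) * Nn = m * Nn + Nn by ring, List.range_add, List.map_append]
    congr 1
    simp only [List.flatMap_cons, List.flatMap_nil, List.append_nil, List.map_map]
    apply List.map_congr_left
    intro x hx
    have hxn : x < Nn := List.mem_range.mp hx
    have hNn : 0 < Nn := Nat.lt_of_le_of_lt (Nat.zero_le x) hxn
    have h1 : (m * Nn + x) / Nn = m := by
      rw [Nat.add_comm, Nat.add_mul_div_right _ _ hNn, Nat.div_eq_of_lt hxn, Nat.zero_add]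
    have h2 : (m * Nn + x) % Nn = x := by
      rw [Nat.add_comm, Nat.add_mul_mod_self_right, Nat.mod_eq_of_lt hxn]
    simp [h1, h2]

theorem pvFlatRow (M N k : Int) :
    (PySem.List.pyRange 0 M 1).foldl (fun fl m =>
        (PySem.List.pyRange 0 N 1).foldl (fun fl n => fl ++ [(m, n, k)]) fl)
      ([] : List (Int × Int × Int))
      = rgm (fun i => (PySem.Int.floordiv i N, PySem.Int.mod i N, k)) 0 (max M 0 * max N 0) := by
  simp only [PySem.List.foldl_append_singleton_eq_map, PySem.List.foldl_append_eq_flatMap,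
    List.nil_append]
  rcases (by omega : M ≤ 0 ∨ 0 < M) with hM | hM
  · rw [PySem.List.pyRange_one_eq_nil (show M ≤ (0:Int) by omega), rgm_eq_range,
      show max M 0 * max N 0 = 0 by rw [show max M 0 = 0 by omega, zero_mul]]
    simp
  rcases (by omega : N ≤ 0 ∨ 0 < N) with hN | hN
  · rw [PySem.List.pyRange_one_eq_nil (show N ≤ (0:Int) by omega), rgm_eq_range,
      show max M 0 * max N 0 = 0 by rw [show max N 0 = 0 by omega, mul_zero]]
    simp
  lift M to ℕ using le_of_lt hM with Mn
  lift N to ℕ using le_of_lt hN with Nn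
  have hmax : ((max (Mn:Int) 0 * max (Nn:Int) 0) - 0).toNat = Mn * Nn := by
    rw [max_eq_left (by positivity), max_eq_left (by positivity), sub_zero, ← Nat.cast_mul,
      Int.toNat_natCast]
  trans ((List.range Mn).flatMap (fun (m : Nat) =>
    (List.range Nn).map (fun (n : Nat) => ((m : Int), (n : Int), k))))
  · simp only [PySem.List.pyRange_one, sub_zero, Int.toNat_natCast, List.flatMap_map,
      List.map_map]
    simp [Function.comp_def]
  · rw [pvDecodeNat, rgm_eq_range, hmax]
    apply List.map_congr_left
    intro t _
    simp

theorem pvFlatCol (M N k : Int) :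
    (PySem.List.pyRange 0 N 1).foldl (fun fl n =>
        (PySem.List.pyRange 0 M 1).foldl (fun fl m => fl ++ [(m, n, k)]) fl)
      ([] : List (Int × Int × Int))
      = rgm (fun i => (PySem.Int.mod i M, PySem.Int.floordiv i M, k)) 0 (max M 0 * max N 0) := by
  simp only [PySem.List.foldl_append_singleton_eq_map, PySem.List.foldl_append_eq_flatMap,
    List.nil_append]
  rcases (by omega : M ≤ 0 ∨ 0 < M) with hM | hM
  · rw [PySem.List.pyRange_one_eq_nil (show M ≤ (0:Int) by omega), rgm_eq_range,
      show max M 0 * max N 0 = 0 by rw [show max M 0 = 0 by omega, zero_mul]]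
    simp
  rcases (by omega : N ≤ 0 ∨ 0 < N) with hN | hN
  · rw [PySem.List.pyRange_one_eq_nil (show N ≤ (0:Int) by omega), rgm_eq_range,
      show max M 0 * max N 0 = 0 by rw [show max N 0 = 0 by omega, mul_zero]]
    simp
  lift M to ℕ using le_of_lt hM with Mn
  lift N to ℕ using le_of_lt hN with Nn
  have hmax : ((max (Mn:Int) 0 * max (Nn:Int) 0) - 0).toNat = Mn * Nn := by
    rw [max_eq_left (by positivity), max_eq_left (by positivity), sub_zero, ← Nat.cast_mul,
      Int.toNat_natCast]
  trans ((List.range Nn).flatMap (fun (n : Nat) =>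
    (List.range Mn).map (fun (m : Nat) => ((m : Int), (n : Int), k))))
  · simp only [PySem.List.pyRange_one, sub_zero, Int.toNat_natCast, List.flatMap_map,
      List.map_map]
    simp [Function.comp_def]
  · rw [pvDecodeNat, rgm_eq_range, hmax, Nat.mul_comm Mn Nn]
    apply List.map_congr_left
    intro t _
    simp

theorem pvFlatBranch (K cc P : Int) (hP : 0 ≤ P) (dec : Int → Int → Int × Int × Int)
    (h : ¬ (cc = 0 ∧ 1 ≤ K)) :
    (PySem.List.pyRange 0 K 1).foldl
        (fun batches k => batches ++ pvChunk (rgm (fun i => dec i k) 0 P) cc) []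
      = (PySem.List.pyRange 0 K 1).foldl (fun batches k =>
          (PySem.List.pyRange 0 P cc).foldl (fun bs i =>
            bs ++ [(PySem.List.pyRange i (min (i + cc) P) 1).map (fun x => dec x k)]) batches) [] := by
  rcases (by omega : K ≤ 0 ∨ 0 < K) with hK | hK
  · rw [PySem.List.pyRange_one_eq_nil (by omega)]
    rfl
  · have hcc : cc ≠ 0 := fun h0 => h ⟨h0, by omega⟩
    simp only [PySem.List.foldl_append_singleton_eq_map, PySem.List.foldl_append_eq_flatMap,
      pvChunkRgm P cc hP hcc]
    simp [rgm]

theorem pvDiagStep (M N cc : Int) (hcc : cc ≠ 0) (k s : Int) :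
    pvChunk ((PySem.List.pyRange (max 0 (s - (N - 1))) (min (M - 1) s + 1) 1).map
        (fun m => (m, s - m, k))) cc
      = (PySem.List.pyRange 0 (max 0 (min (M - 1) s - max 0 (s - (N - 1)) + 1)) cc).map
          (fun i => (PySem.List.pyRange 0
              (min cc (max 0 (min (M - 1) s - max 0 (s - (N - 1)) + 1) - i)) 1).map
            (fun j => (max 0 (s - (N - 1)) + i + j, s - max 0 (s - (N - 1)) - i - j, k))) := by
  set a := max 0 (s - (N - 1)) with ha
  set e := min (M - 1) s with he
  set cnt := max 0 (e - a + 1) with hcnt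
  have h1 : (PySem.List.pyRange a (e + 1) 1).map (fun m => (m, s - m, k))
      = rgm (fun t => (a + t, s - (a + t), k)) 0 cnt := by
    have : (PySem.List.pyRange a (e + 1) 1).map (fun m => (m, s - m, k))
        = rgm (fun m => (m, s - m, k)) a (e + 1) := rfl
    rw [this, rgm_eq_range, rgm_eq_range,
      show (cnt - 0).toNat = (e + 1 - a).toNat by omega]
    apply List.map_congr_left
    intro t _
    simp only [zero_add]
  rw [h1, pvChunkRgm cnt cc (le_max_left 0 _) hcc]
  apply List.map_congr_left
  intro i _
  have h2 : (PySem.List.pyRange 0 (min cc (cnt - i)) 1).map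
      (fun j => (a + i + j, s - a - i - j, k))
      = rgm (fun j => (a + i + j, s - a - i - j, k)) 0 (min cc (cnt - i)) := rfl
  rw [h2, rgm_eq_range, rgm_eq_range,
    show (min (i + cc) cnt - i).toNat = (min cc (cnt - i) - 0).toNat by omega]
  apply List.map_congr_left
  intro t _
  simp only [zero_add, Prod.mk.injEq]
  refine ⟨by ring, by ring, trivial⟩

-- ===== VERDICT (by name: the statement is the Claim_ definition above) =====
theorem generate_hbm_batches_spec : Claim_equal_generate_hbm_batches := by
  intro M N K cc schedule cb _hdom hpre
  unfold Spec_generate_hbm_batches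
  unfold Pre_generate_hbm_batches at hpre
  by_cases h1 : schedule = "custom"
  · subst h1
    simp [generate_hbm_batches, generate_hbm_batches_alt]
  by_cases h2 : schedule = "diagonal-channel"
  · subst h2
    simp only [String.reduceEq, if_false] at hpre ⊢
    simp only [generate_hbm_batches, generate_hbm_batches_alt, String.reduceEq, reduceIte]
    rcases (by omega : cc ≤ 0 ∨ 0 < cc) with hcc | hcc
    · rw [PySem.List.pyRange_one_eq_nil (show cc ≤ (0:Int) by omega)]
      simp
    · have hne : ∀ (f : Int → Int × Int × Int),
          ((PySem.List.pyRange 0 cc 1).map f).isEmpty = false := by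
        intro f
        rw [PySem.List.pyRange_one_cons (by omega : (0:Int) < cc)]
        simp
      simp only [PySem.List.foldl_append_singleton_eq_map, List.nil_append, hne,
        Bool.false_eq_true, if_false, PySem.List.foldl_append_eq_flatMap]
  by_cases h3 : schedule = "diagonal"
  · subst h3
    simp only [String.reduceEq, if_false] at hpre ⊢
    simp only [generate_hbm_batches, generate_hbm_batches_alt, String.reduceEq, reduceIte]
    by_cases hcc : cc = 0
    · have hKMN : K ≤ 0 ∨ M + N ≤ 1 := by
        by_cases hK : 1 ≤ K
        · by_cases hMN : 2 ≤ M + N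
          · exact absurd ⟨hcc, hK, hMN⟩ hpre
          · right; omega
        · left; omega
      rcases hKMN with hK | hMN
      · rw [PySem.List.pyRange_one_eq_nil (show K ≤ (0:Int) by omega)]
        rfl
      · rw [PySem.List.pyRange_one_eq_nil (show M + N - 1 ≤ (0:Int) by omega)]
        simp
    · simp only [PySem.List.foldl_append_singleton_eq_map, List.nil_append]
      simp only [pvDiagStep M N cc hcc]
  by_cases h4 : schedule = "row-major"
  · subst h4
    simp only [String.reduceEq, if_false] at hpre ⊢
    simp only [generate_hbm_batches, generate_hbm_batches_alt, String.reduceEq, reduceIte]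
    simp only [pvFlatRow]
    exact pvFlatBranch K cc (max M 0 * max N 0) (by positivity)
      (fun i k => (PySem.Int.floordiv i N, PySem.Int.mod i N, k)) hpre
  by_cases h5 : schedule = "col-major"
  · subst h5
    simp only [String.reduceEq, if_false] at hpre ⊢
    simp only [generate_hbm_batches, generate_hbm_batches_alt, String.reduceEq, reduceIte]
    simp only [pvFlatCol]
    exact pvFlatBranch K cc (max M 0 * max N 0) (by positivity)
      (fun i k => (PySem.Int.mod i M, PySem.Int.floordiv i M, k)) hpre
  · simp only [if_neg h1, if_neg h2, if_neg h3] at hpre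
    simp only [generate_hbm_batches, generate_hbm_batches_alt, if_neg h1, if_neg h2, if_neg h3,
      if_neg h4, if_neg h5]
    simp only [pvFlatRow]
    exact pvFlatBranch K cc (max M 0 * max N 0) (by positivity)
      (fun i k => (PySem.Int.floordiv i N, PySem.Int.mod i N, k)) hpre
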